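-- pv_equiv track=rewrite | github.com/Edlison/Compiler | temp.py | prostr
-- ===== SOURCE A (Python) =====
-- def prostr(grammer):
--     pro_str = []
--     for gra_line in grammer:
--         #先看每一行有几个产生式，把每一个产生式的开始索引加入pro_index
--         pro_index = []
--         i = 0
--         while i < len(gra_line):
--             if gra_line[i] == '>' or gra_line[i] == '|':
--                 pro_index.append(i + 1)
--             i += 1
--         for p in pro_index:
--             str = ''
--             for s in gra_line[p:]:
--                 if s == '|' or s == '\n':
--                     break
--                 else:
--                     str = str + s
--             pro_str.append(str)
--     return pro_str
-- ===== SOURCE B (Python) =====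
-- def _upto_nl(s):
--     j = s.find('\n')
--     return s if j < 0 else s[:j]
--
-- def _gt_prods(chunk):
--     return [_upto_nl(chunk[i + 1:]) for i, ch in enumerate(chunk) if ch == '>']
--
-- def prostr(grammer):
--     out = []
--     for line in grammer:
--         chunks = line.split('|')
--         out.extend(_gt_prods(chunks[0]))
--         for chunk in chunks[1:]:
--             out.append(_upto_nl(chunk))
--             out.extend(_gt_prods(chunk))
--     return out
-- ===== Notes on version B (the rewrite author's own statement) =====
-- stated objective: idiomatic
-- what changed: B replaces A's manual index-collection pass (scan for '>'/'|' positions, then re-scan suffixes char by char with a break) by splitting each line on '|' and truncating chunks/'>'-suffixes at the first newline via str.find and slicing.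
import Mathlib
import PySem

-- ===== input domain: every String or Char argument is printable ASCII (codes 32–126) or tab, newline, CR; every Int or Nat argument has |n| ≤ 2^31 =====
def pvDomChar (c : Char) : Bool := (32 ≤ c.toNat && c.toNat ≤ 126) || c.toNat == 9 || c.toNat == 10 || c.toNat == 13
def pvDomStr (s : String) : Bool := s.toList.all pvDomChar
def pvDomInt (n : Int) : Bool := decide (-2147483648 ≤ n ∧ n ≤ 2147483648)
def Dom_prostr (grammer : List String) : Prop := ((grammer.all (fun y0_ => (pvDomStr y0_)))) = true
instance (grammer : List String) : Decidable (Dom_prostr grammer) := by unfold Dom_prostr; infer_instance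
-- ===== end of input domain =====

-- B rewrites A's manual index-collection and suffix re-scan as split-on-'|' plus
-- newline truncation of chunks and '>'-suffixes (objective: idiomatic; same cost).

-- ===== PORT A =====
-- 'while i < len(line): if line[i] in ('>','|'): pro_index.append(i+1); i += 1'
-- ported as structural recursion over the remaining characters with the counter i (exact).
def proIndexGo (cs : List Char) (i : Nat) : List Nat :=
  match cs with
  | [] => []
  | c :: t => if c = '>' || c = '|' then (i + 1) :: proIndexGo t (i + 1)
              else proIndexGo t (i + 1)

-- inner loop 'for s in line[p:]: if s in ('|','\n'): break else str = str + s' (exact;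
-- the accumulator string is kept as List Char, wrapped by String.ofList at the append site).
def buildGo (acc : List Char) (cs : List Char) : List Char :=
  match cs with
  | [] => acc
  | s :: t => if s = '|' || s = '\n' then acc else buildGo (acc ++ [s]) t

-- per-line body: the index pass, then 'for p in pro_index: pro_str.append(...)';
-- line[p:] with p ≥ 0 is List.drop p (exact).
def prostrLineA (line : List Char) : List String :=
  (proIndexGo line 0).map (fun p => String.ofList (buildGo [] (line.drop p)))

def prostr (grammer : List String) : List String :=
  grammer.foldl (fun acc line => acc ++ prostrLineA line.toList) []

-- ===== PORT B =====
-- Source B _upto_nl: j = s.find('\n'); s if j < 0 else s[:j] — ported via findIdx? (none ↔ j < 0)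
-- and List.take (exact for the single character '\n').
def uptoNL (s : List Char) : List Char :=
  match s.findIdx? (· = '\n') with
  | none => s
  | some j => s.take j

-- Source B _gt_prods: comprehension over enumerate(chunk); chunk[i+1:] is the suffix t (exact).
def gtProds (chunk : List Char) : List String :=
  match chunk with
  | [] => []
  | c :: t => if c = '>' then String.ofList (uptoNL t) :: gtProds t else gtProds t

-- Source B line.split('|') — hand port of str.split with a one-character separator (exact).
def barSplit : List Char → List (List Char)
  | [] => [[]]
  | c :: t => if c = '|' then [] :: barSplit t
              else (c :: (barSplit t).headI) :: (barSplit t).tail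

-- chunks[0] is headI (split always returns a nonempty list), chunks[1:] is tail.
def prostrLineB (line : List Char) : List String :=
  gtProds (barSplit line).headI ++
    (barSplit line).tail.flatMap (fun ch => String.ofList (uptoNL ch) :: gtProds ch)

def prostr_alt (grammer : List String) : List String :=
  grammer.flatMap (fun line => prostrLineB line.toList)

-- ===== PRECONDITION & SPEC =====
def Spec_prostr (grammer : List String) (out : List String) : Prop := out = prostr_alt grammer
instance (grammer : List String) (out : List String) : Decidable (Spec_prostr grammer out) := by unfold Spec_prostr; infer_instance

-- ===== CLAIM (what is proved, stated in full; the proofs are below) =====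
def Claim_equal_prostr : Prop := ∀ (grammer : List String), Dom_prostr grammer → Spec_prostr grammer (prostr grammer)

-- ===== LEMMAS AND PROOFS =====

-- the common shape: one production starting right after each delimiter, in text order
def prodsOf : List Char → List String
  | [] => []
  | c :: t => if c = '>' || c = '|' then String.ofList (t.takeWhile fun s => !(s = '|' || s = '\n')) :: prodsOf t
              else prodsOf t

theorem buildGo_eq_takeWhile (cs acc : List Char) :
    buildGo acc cs = acc ++ cs.takeWhile (fun s => !(s = '|' || s = '\n')) := by
  induction cs generalizing acc with
  | nil => simp [buildGo]
  | cons s t ih =>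
      by_cases h1 : s = '|' <;> by_cases h2 : s = '\n' <;>
        simp [buildGo, h1, h2, ih]

theorem proIndexGo_shift (cs : List Char) (i : Nat) :
    proIndexGo cs i = (proIndexGo cs 0).map (· + i) := by
  induction cs generalizing i with
  | nil => simp [proIndexGo]
  | cons c t ih =>
      by_cases h : (c = '>' || c = '|') = true
      · simp only [proIndexGo, if_pos h, List.map_cons, ih (i + 1), ih 1,
          List.map_map, Function.comp_def]
        congr 1
        · omega
        · exact List.map_congr_left fun a _ => by omega
      · simp only [proIndexGo, if_neg h, ih (i + 1), ih 1, List.map_map, Function.comp_def]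
        exact List.map_congr_left fun a _ => by omega

theorem lineA_eq_prodsOf (cs : List Char) : prostrLineA cs = prodsOf cs := by
  induction cs with
  | nil => simp [prostrLineA, proIndexGo, prodsOf]
  | cons c t ih =>
      unfold prostrLineA at ih ⊢
      unfold prodsOf
      have e : (proIndexGo t 1).map (fun p => String.ofList (buildGo [] ((c :: t).drop p)))
          = prodsOf t := by
        rw [proIndexGo_shift t 1, List.map_map, ← ih]
        exact List.map_congr_left (fun p _ => by simp [Function.comp])
      by_cases h : (c = '>' || c = '|') = true
      · simp only [proIndexGo, h, if_true, List.map_cons, e]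
        simp [buildGo_eq_takeWhile]
      · simp [proIndexGo, h, e]

set_option maxRecDepth 8192 in
theorem uptoNL_eq_takeWhile (s : List Char) : uptoNL s = s.takeWhile (fun x => !decide (x = '\n')) := by
  induction s with
  | nil => simp [uptoNL]
  | cons c t ih =>
      by_cases h : c = '\n'
      · simp only [uptoNL, List.findIdx?_cons, h]
        simp only [decide_true, if_true, List.take_zero, List.takeWhile_cons,
          Bool.not_true, Bool.false_eq_true, if_false]
      · cases hf : List.findIdx? (fun x => decide (x = '\n')) t with
        | none =>
            have ih' := ih; simp only [uptoNL, hf] at ih'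
            simp only [uptoNL, List.findIdx?_cons, hf]
            simp [h, ← ih']
        | some j =>
            have ih' := ih; simp only [uptoNL, hf] at ih'
            simp only [uptoNL, List.findIdx?_cons, hf]
            simp [h, ← ih']

theorem barSplit_ne_nil (cs : List Char) : barSplit cs ≠ [] := by
  cases cs with
  | nil => simp [barSplit]
  | cons c t => by_cases h : c = '|' <;> simp [barSplit, h]

theorem barSplit_headI (cs : List Char) :
    (barSplit cs).headI = cs.takeWhile (fun x => !decide (x = '|')) := by
  induction cs with
  | nil => simp [barSplit]
  | cons c t ih =>
      by_cases h : c = '|' <;> simp [barSplit, h, ih]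

theorem takeWhile_bar_nl (cs : List Char) :
    (cs.takeWhile (fun x => !decide (x = '|'))).takeWhile (fun x => !decide (x = '\n'))
      = cs.takeWhile (fun s => !(s = '|' || s = '\n')) := by
  induction cs with
  | nil => simp
  | cons c t ih =>
      by_cases h1 : c = '|' <;> by_cases h2 : c = '\n' <;>
        simp [h1, h2, ih]

theorem uptoNL_headI (cs : List Char) :
    uptoNL ((barSplit cs).headI) = cs.takeWhile (fun s => !(s = '|' || s = '\n')) := by
  rw [barSplit_headI, uptoNL_eq_takeWhile, takeWhile_bar_nl]

theorem lineB_eq_prodsOf (cs : List Char) : prostrLineB cs = prodsOf cs := by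
  induction cs with
  | nil => simp [prostrLineB, barSplit, gtProds, prodsOf]
  | cons c t ih =>
      unfold prostrLineB at ih ⊢
      unfold prodsOf
      obtain ⟨hd, tl, hht⟩ := List.exists_cons_of_ne_nil (barSplit_ne_nil t)
      have hh : hd = (barSplit t).headI := by simp [hht]
      rw [hht] at ih
      simp only [List.headI, List.tail_cons] at ih
      have hu : String.ofList (uptoNL hd)
          = String.ofList (t.takeWhile (fun s => !(s = '|' || s = '\n'))) := by
        rw [hh, uptoNL_headI]
      by_cases h1 : c = '|'
      · have hdel : (c = '>' || c = '|') = true := by simp [h1]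
        simp only [barSplit, if_pos h1, List.headI, List.tail_cons, gtProds,
          List.nil_append, hdel, if_true, hht, List.flatMap_cons, List.cons_append]
        rw [hu, ih]
      · simp only [barSplit, if_neg h1, hht, List.headI, List.tail_cons]
        by_cases h2 : c = '>'
        · have hdel : (c = '>' || c = '|') = true := by simp [h2]
          simp only [gtProds, if_pos h2, hdel, if_true, List.cons_append]
          rw [hu, ih]
        · have hdel : (c = '>' || c = '|') = false := by simp [h1, h2]
          simp only [gtProds, if_neg h2, hdel, Bool.false_eq_true, if_false]
          exact ih

theorem lineA_eq_lineB (cs : List Char) : prostrLineA cs = prostrLineB cs := by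
  rw [lineA_eq_prodsOf, lineB_eq_prodsOf]

-- ===== VERDICT (by name: the statement is the Claim_ definition above) =====
theorem prostr_spec : Claim_equal_prostr := by
  intro grammer _
  unfold Spec_prostr prostr prostr_alt
  rw [PySem.List.foldl_append_eq_flatMap]
  simp [lineA_eq_lineB]
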